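-- pv_equiv track=rewrite | github.com/solbiko/algorithm | 프로그래머스/lv2/12911. 다음 큰 숫자/다음 큰 숫자.py | solution
-- ===== SOURCE A (Python) =====
-- def solution(n):
--     answer = 0
--
--     cnt=bin(n)[2:].count('1')
--     n+=1
--
--     while True:
--         if cnt == bin(n)[2:].count('1'):
--             answer=n
--             break
--         else:
--             n+=1
--
--     return answer
-- ===== SOURCE B (Python) =====
-- def solution(n):
--     b = 0
--     while (n >> b) % 2 == 0:
--         b += 1
--     a = 0
--     while (n >> (b + a)) % 2 == 1:
--         a += 1
--     q = n >> (a + b)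
--     return ((q + 1) << (a + b)) + (1 << (a - 1)) - 1
-- ===== Notes on version B (the rewrite author's own statement) =====
-- stated objective: faster
-- what changed: A linearly scans n+1, n+2, ... recomputing a binary-string popcount until it finds the same bit count; B builds the answer directly from n's trailing-zero/trailing-one block structure (Gosper-style next same-popcount number) in O(log n) bit arithmetic with no search; Pre_ restricts to positive n, the task's domain: at n = 0 A loops forever, and on negative n A's '1'-count comes from slicing the '-0b' prefix of bin() while B's trailing-bit loops need not terminate on a negative int.
-- outside the precondition, e.g. on solution(-4): A returns -2, B does not finish within the time limit
import Mathlib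
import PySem

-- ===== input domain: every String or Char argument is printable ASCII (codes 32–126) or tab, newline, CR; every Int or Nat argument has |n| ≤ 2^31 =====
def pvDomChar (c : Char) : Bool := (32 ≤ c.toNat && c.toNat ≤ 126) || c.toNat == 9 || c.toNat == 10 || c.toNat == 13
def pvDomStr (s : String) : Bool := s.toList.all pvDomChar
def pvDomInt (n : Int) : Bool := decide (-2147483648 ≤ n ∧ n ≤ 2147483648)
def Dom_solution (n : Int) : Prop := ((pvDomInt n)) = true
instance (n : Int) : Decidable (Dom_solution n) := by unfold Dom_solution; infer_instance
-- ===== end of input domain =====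

-- B replaces A's linear upward scan (recomputing a binary-string popcount at every step) by a direct
-- Gosper-style bit construction of the next number with the same '1'-digit count (no search loop).

-- ===== PORT A =====
-- hand port of bin(n)[2:]: binary digits of |n|, with bin(0)[2:] = "0" and, for n<0, the leftover
-- 'b' of the '-0b' prefix (bin(-5)[2:] = "b101"); exact on all ints since only ASCII chars appear.
def binDigits (x : Nat) : List Char :=
  if h : x = 0 then [] else binDigits (x / 2) ++ [if x % 2 = 1 then '1' else '0']
decreasing_by exact Nat.div_lt_self (Nat.pos_of_ne_zero h) (by omega)

def binTail (n : Int) : List Char :=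
  (if n < 0 then ['b'] else []) ++ (if n.natAbs = 0 then ['0'] else binDigits n.natAbs)

-- bin(n)[2:].count('1'): count of '1' characters, exact as List.count on the ported string
def oneCount (n : Int) : Nat := (binTail n).count '1'

-- the 'while True' search loop; fuel only makes the recursion total (2^40 exceeds every gap on Dom):
-- Python returns the untouched answer=0 only by looping forever, which happens only at n=0 (outside Pre_)
def solLoop (cnt : Nat) (n : Int) : Nat → Int
  | 0 => 0
  | fuel + 1 => if cnt = oneCount n then n else solLoop cnt (n + 1) fuel

def solution (n : Int) : Int := solLoop (oneCount n) (n + 1) (2 ^ 40)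

-- ===== PORT B =====
-- B's two bit-scanning loops, as structural recursion over the (nonnegative on Pre_) value.
-- count of trailing one-bits (the 'while (n >> (b + a)) % 2 == 1: a += 1' loop)
def cto (x : Nat) : Nat :=
  if h : x % 2 = 1 then cto (x / 2) + 1 else 0
decreasing_by exact Nat.div_lt_self (by omega) (by omega)

-- count of trailing zero-bits (the 'while (n >> b) % 2 == 0: b += 1' loop); the x = 0 guard only
-- makes the recursion total (Python's loop runs forever there; n = 0 is outside Pre_)
def ctz (x : Nat) : Nat :=
  if h : x = 0 then 0 else if x % 2 = 0 then ctz (x / 2) + 1 else 0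
decreasing_by exact Nat.div_lt_self (Nat.pos_of_ne_zero h) (by omega)

def solution_alt (n : Int) : Int :=
  -- on Pre_ every intermediate is a nonnegative int, so Nat shifts are exact
  let x := n.toNat
  let b := ctz x
  let a := cto (x >>> b)
  let q := x >>> (a + b)
  (((q + 1) <<< (a + b) + ((1 <<< (a - 1)) - 1) : Nat) : Int)

-- ===== PRECONDITION & SPEC =====
-- Pre_ restricts to positive n, the task's domain: at n = 0 A's while-loop never terminates, and on
-- negative n A's '1'-count comes from slicing the '-0b' prefix of bin() (an accident of the string
-- slice) while B's trailing-bit loops need not terminate on a negative int.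
def Pre_solution (n : Int) : Prop := 1 ≤ n
instance (n : Int) : Decidable (Pre_solution n) := by unfold Pre_solution; infer_instance

def pvWitness_solution : Int := 1

def Spec_solution (n : Int) (out : Int) : Prop := out = solution_alt n
instance (n : Int) (out : Int) : Decidable (Spec_solution n out) := by unfold Spec_solution; infer_instance

-- ===== CLAIM (what is proved, stated in full; the proofs are below) =====
def Claim_equal_solution : Prop := ∀ (n : Int), Dom_solution n → Pre_solution n → Spec_solution n (solution n)

-- ===== LEMMAS AND PROOFS =====

-- popcount of a natural number (proof-side characterisation of the '1'-digit count)
def pc (x : Nat) : Nat :=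
  if h : x = 0 then 0 else pc (x / 2) + x % 2
decreasing_by exact Nat.div_lt_self (Nat.pos_of_ne_zero h) (by omega)

theorem pc_zero : pc 0 = 0 := by simp [pc]

theorem pc_bit (m e : Nat) (he : e < 2) : pc (2 * m + e) = pc m + e := by
  rcases Nat.eq_zero_or_pos (2 * m + e) with h0 | h0
  · have hm : m = 0 := by omega
    have hee : e = 0 := by omega
    simp [hm, hee, pc_zero]
  · rw [pc]
    have h1 : ¬(2 * m + e = 0) := by omega
    simp only [h1, dif_neg, not_false_iff]
    have h2 : (2 * m + e) / 2 = m := by omega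
    have h3 : (2 * m + e) % 2 = e := by omega
    rw [h2, h3]

theorem pc_mul_pow (m k : Nat) : pc (m * 2 ^ k) = pc m := by
  induction k with
  | zero => simp
  | succ k ih =>
    have : m * 2 ^ (k + 1) = 2 * (m * 2 ^ k) + 0 := by ring
    rw [this, pc_bit _ _ (by omega)]
    simpa using ih

theorem pc_split (k : Nat) : ∀ s r : Nat, r < 2 ^ k → pc (s * 2 ^ k + r) = pc s + pc r := by
  induction k with
  | zero => intro s r hr; interval_cases r <;> simp [pc_zero]
  | succ k ih =>
    intro s r hr
    have hdecomp : s * 2 ^ (k + 1) + r = 2 * (s * 2 ^ k + r / 2) + r % 2 := by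
      have : r = 2 * (r / 2) + r % 2 := by omega
      ring_nf
      omega
    rw [hdecomp, pc_bit _ _ (by omega)]
    have hr2 : r / 2 < 2 ^ k := by
      have : 2 ^ (k + 1) = 2 * 2 ^ k := by ring
      omega
    rw [ih s (r / 2) hr2]
    have hrpc : pc r = pc (r / 2) + r % 2 := by
      conv_lhs => rw [show r = 2 * (r / 2) + r % 2 by omega]
      rw [pc_bit _ _ (by omega)]
    omega

theorem pc_pow_sub_one (k : Nat) : pc (2 ^ k - 1) = k := by
  induction k with
  | zero => simpa using pc_zero
  | succ k ih =>
    have h1 : (1 : Nat) ≤ 2 ^ k := Nat.one_le_two_pow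
    have : 2 ^ (k + 1) - 1 = 2 * (2 ^ k - 1) + 1 := by
      have : 2 ^ (k + 1) = 2 * 2 ^ k := by ring
      omega
    rw [this, pc_bit _ _ (by omega), ih]

-- every number with popcount m is at least 2^m - 1
theorem pc_ge (r : Nat) : ∀ m, pc r = m → 2 ^ m - 1 ≤ r := by
  induction r using Nat.strong_induction_on with
  | _ r ih =>
    intro m hm
    rcases Nat.eq_zero_or_pos r with h0 | h0
    · subst h0; rw [pc_zero] at hm; subst hm; simp
    · have hr : r = 2 * (r / 2) + r % 2 := by omega
      have hpc : pc r = pc (r / 2) + r % 2 := by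
        conv_lhs => rw [hr]
        rw [pc_bit _ _ (by omega)]
      have ih2 := ih (r / 2) (by omega) (pc (r / 2)) rfl
      rcases (by omega : r % 2 = 0 ∨ r % 2 = 1) with he | he
      · have hm' : m = pc (r / 2) := by omega
        subst hm'
        omega
      · have hm' : m = pc (r / 2) + 1 := by omega
        subst hm'
        have : 2 ^ (pc (r / 2) + 1) = 2 * 2 ^ (pc (r / 2)) := by ring
        omega

-- every number below 2^(a+b) with popcount a is at most (2^a - 1) * 2^b
theorem pc_le (r : Nat) : ∀ a b, r < 2 ^ (a + b) → pc r = a → r ≤ (2 ^ a - 1) * 2 ^ b := by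
  induction r using Nat.strong_induction_on with
  | _ r ih =>
    intro a b hlt hpc
    rcases Nat.eq_zero_or_pos r with h0 | h0
    · subst h0; exact Nat.zero_le _
    · have hr : r = 2 * (r / 2) + r % 2 := by omega
      have hpc2 : pc r = pc (r / 2) + r % 2 := by
        conv_lhs => rw [hr]
        rw [pc_bit _ _ (by omega)]
      rcases (by omega : r % 2 = 0 ∨ r % 2 = 1) with he | he
      · rcases Nat.eq_zero_or_pos b with hb | hb
        · subst hb
          simp only [Nat.add_zero] at hlt
          have h1 : (1 : Nat) ≤ 2 ^ a := Nat.one_le_two_pow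
          have : r ≤ 2 ^ a - 1 := by omega
          simpa using this
        · obtain ⟨b', rfl⟩ : ∃ b', b = b' + 1 := ⟨b - 1, by omega⟩
          have hlt' : r / 2 < 2 ^ (a + b') := by
            have : 2 ^ (a + (b' + 1)) = 2 * 2 ^ (a + b') := by ring
            omega
          have := ih (r / 2) (by omega) a b' hlt' (by omega)
          have hmul : (2 ^ a - 1) * 2 ^ (b' + 1) = 2 * ((2 ^ a - 1) * 2 ^ b') := by ring
          omega
      · have ha : 1 ≤ a := by omega
        obtain ⟨a', rfl⟩ : ∃ a', a = a' + 1 := ⟨a - 1, by omega⟩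
        have hlt' : r / 2 < 2 ^ (a' + b) := by
          have : 2 ^ (a' + 1 + b) = 2 * 2 ^ (a' + b) := by ring
          omega
        have hih := ih (r / 2) (by omega) a' b hlt' (by omega)
        have hb1 : (1 : Nat) ≤ 2 ^ b := Nat.one_le_two_pow
        have ha1 : (1 : Nat) ≤ 2 ^ a' := Nat.one_le_two_pow
        have hmul : (2 ^ (a' + 1) - 1) * 2 ^ b = 2 * ((2 ^ a' - 1) * 2 ^ b) + 2 ^ b := by
          obtain ⟨c, hc⟩ : ∃ c, 2 ^ a' = c + 1 := ⟨2 ^ a' - 1, by omega⟩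
          have h2 : 2 ^ (a' + 1) = 2 * 2 ^ a' := by ring
          rw [h2, hc]
          have e1 : 2 * (c + 1) - 1 = 2 * c + 1 := by omega
          have e2 : c + 1 - 1 = c := by omega
          rw [e1, e2]
          ring
        omega

theorem pc_succ_even (q : Nat) (h : q % 2 = 0) : pc (q + 1) = pc q + 1 := by
  have h1 : q + 1 = 2 * (q / 2) + 1 := by omega
  have h2 : q = 2 * (q / 2) + 0 := by omega
  rw [h1, pc_bit _ _ (by omega)]
  conv_rhs => rw [h2, pc_bit _ _ (by omega)]

-- the '1'-digit count of the ported bin string is popcount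
theorem count_binDigits (x : Nat) : (binDigits x).count '1' = pc x := by
  induction x using Nat.strong_induction_on with
  | _ x ih =>
    rcases Nat.eq_zero_or_pos x with h0 | h0
    · subst h0; simp [binDigits, pc_zero]
    · rw [binDigits, pc]
      have hne : ¬(x = 0) := by omega
      simp only [hne, dif_neg, not_false_iff]
      rw [List.count_append, ih (x / 2) (by omega)]
      rcases (by omega : x % 2 = 0 ∨ x % 2 = 1) with he | he <;>
        simp [he]

theorem oneCount_eq (m : Int) : oneCount m = pc m.natAbs := by
  unfold oneCount binTail
  rcases Nat.eq_zero_or_pos m.natAbs with h0 | h0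
  · simp [h0, pc_zero, List.count_append]
    split <;> simp
  · have hne : ¬(m.natAbs = 0) := by omega
    simp only [hne, if_false, List.count_append]
    rw [count_binDigits]
    split <;> simp

-- trailing-ones decomposition produced by cto
theorem cto_spec (y : Nat) : (y / 2 ^ cto y) % 2 = 0 ∧ y = (y / 2 ^ cto y) * 2 ^ cto y + (2 ^ cto y - 1) := by
  induction y using Nat.strong_induction_on with
  | _ y ih =>
    by_cases h : y % 2 = 1
    · rw [cto]; simp only [h, dif_pos]
      have hy : 1 ≤ y := by omega
      obtain ⟨h1, h2⟩ := ih (y / 2) (by omega)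
      set a := cto (y / 2) with ha
      have hp : 2 ^ (a + 1) = 2 * 2 ^ a := by ring
      have hq : y / 2 ^ (a + 1) = (y / 2) / 2 ^ a := by
        rw [hp, Nat.div_div_eq_div_mul]
      refine ⟨by rw [hq]; exact h1, ?_⟩
      rw [hq, hp]
      have hpa : (1 : Nat) ≤ 2 ^ a := Nat.one_le_two_pow
      have hring : (y / 2 / 2 ^ a) * (2 * 2 ^ a) = 2 * ((y / 2 / 2 ^ a) * 2 ^ a) := by ring
      omega
    · rw [cto]; simp only [h, dif_neg, not_false_iff]
      refine ⟨?_, by simp⟩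
      simp only [pow_zero, Nat.div_one]
      omega

theorem cto_pos (y : Nat) (h : y % 2 = 1) : 1 ≤ cto y := by
  rw [cto]; simp [h]

-- trailing-zeros decomposition produced by ctz
theorem ctz_spec (x : Nat) (hx : x ≠ 0) : (x / 2 ^ ctz x) % 2 = 1 ∧ x = (x / 2 ^ ctz x) * 2 ^ ctz x := by
  induction x using Nat.strong_induction_on with
  | _ x ih =>
    rw [ctz]
    simp only [hx, dif_neg, not_false_iff]
    by_cases h : x % 2 = 0
    · simp only [h, if_pos]
      have hx2 : x / 2 ≠ 0 := by omega
      obtain ⟨h1, h2⟩ := ih (x / 2) (by omega) hx2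
      set b := ctz (x / 2) with hb
      have hp : 2 ^ (b + 1) = 2 * 2 ^ b := by ring
      have hq : x / 2 ^ (b + 1) = (x / 2) / 2 ^ b := by
        rw [hp, Nat.div_div_eq_div_mul]
      refine ⟨by rw [hq]; exact h1, ?_⟩
      rw [hq, hp]
      have hring : (x / 2 / 2 ^ b) * (2 * 2 ^ b) = 2 * ((x / 2 / 2 ^ b) * 2 ^ b) := by ring
      omega
    · simp only [h, if_neg, not_false_iff]
      refine ⟨?_, by simp⟩
      simp only [pow_zero, Nat.div_one]
      omega

-- the search loop returns the least match at or after m, given enough fuel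
theorem solLoop_eq (t : Int) (cnt : Nat) :
    ∀ fuel (m : Int), m ≤ t → (t - m).toNat < fuel → oneCount t = cnt →
    (∀ k : Int, m ≤ k → k < t → oneCount k ≠ cnt) → solLoop cnt m fuel = t := by
  intro fuel
  induction fuel with
  | zero => intro m hm hf _ _; omega
  | succ fuel ih =>
    intro m hm hf ht hmin
    rw [solLoop]
    by_cases hmt : m = t
    · subst hmt
      simp [ht]
    · have hlt : m < t := by omega
      have hne : cnt ≠ oneCount m := fun h => hmin m le_rfl hlt h.symm
      simp only [hne, if_neg, not_false_iff]
      exact ih (m + 1) (by omega) (by omega) ht (fun k hk1 hk2 => hmin k (by omega) hk2)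

-- the Gosper-style successor: value, popcount, and strict minimality among larger numbers
theorem core_search (q a b : Nat) (ha : 1 ≤ a) (hq : q % 2 = 0) (x T : Nat)
    (hxval : x = (q * 2 ^ a + (2 ^ a - 1)) * 2 ^ b)
    (hTval : T = (q + 1) * 2 ^ (a + b) + (2 ^ (a - 1) - 1)) :
    pc T = pc x ∧ x < T ∧ T ≤ 5 * x + 5 ∧ ∀ s, x < s → s < T → pc s ≠ pc x := by
  have h2a : (1 : Nat) ≤ 2 ^ a := Nat.one_le_two_pow
  have h2b : (1 : Nat) ≤ 2 ^ b := Nat.one_le_two_pow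
  have h2a1 : (1 : Nat) ≤ 2 ^ (a - 1) := Nat.one_le_two_pow
  have hK : 2 ^ (a + b) = 2 ^ a * 2 ^ b := pow_add 2 a b
  have hKsplit : 2 ^ a = 2 * 2 ^ (a - 1) := by
    have h' : a = (a - 1) + 1 := by omega
    conv_lhs => rw [h']
    rw [pow_succ]; ring
  have hale : 2 ^ (a - 1) ≤ 2 ^ (a + b) := Nat.pow_le_pow_right (by omega) (by omega)
  have hxexp : x = q * 2 ^ (a + b) + (2 ^ a - 1) * 2 ^ b := by
    rw [hxval, Nat.add_mul, hK, mul_assoc]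
  have pcx : pc x = pc q + a := by
    rw [hxval, pc_mul_pow, pc_split a q (2 ^ a - 1) (by omega), pc_pow_sub_one]
  have pcT : pc T = pc q + a := by
    rw [hTval, pc_split (a + b) (q + 1) (2 ^ (a - 1) - 1) (by omega),
        pc_succ_even q hq, pc_pow_sub_one]
    omega
  have hlt1 : (2 ^ a - 1) * 2 ^ b < 2 ^ a * 2 ^ b :=
    mul_lt_mul_of_pos_right (by omega) (by omega)
  have hd : (q + 1) * 2 ^ (a + b) = q * 2 ^ (a + b) + 2 ^ (a + b) := by ring
  have hxT : x < T := by omega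
  have hhalf : 2 ^ (a - 1) * 2 ^ b ≤ (2 ^ a - 1) * 2 ^ b :=
    Nat.mul_le_mul_right _ (by omega)
  have hKdouble : 2 ^ a * 2 ^ b = 2 * (2 ^ (a - 1) * 2 ^ b) := by
    rw [hKsplit]; ring
  have hT5 : T ≤ 5 * x + 5 := by omega
  refine ⟨by omega, hxT, hT5, ?_⟩
  intro s hs1 hs2 hps
  have hKpos : 0 < 2 ^ (a + b) := by omega
  have hdm := Nat.div_add_mod s (2 ^ (a + b))
  have hr : s % 2 ^ (a + b) < 2 ^ (a + b) := Nat.mod_lt _ hKpos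
  have hqle : q ≤ s / 2 ^ (a + b) := by
    rw [Nat.le_div_iff_mul_le hKpos]; omega
  have hlt2 : s / 2 ^ (a + b) < q + 2 := by
    rw [Nat.div_lt_iff_lt_mul hKpos]
    have : (q + 2) * 2 ^ (a + b) = q * 2 ^ (a + b) + 2 * 2 ^ (a + b) := by ring
    omega
  set r := s % 2 ^ (a + b) with hrd
  rcases (by omega : s / 2 ^ (a + b) = q ∨ s / 2 ^ (a + b) = q + 1) with hc | hc
  · have hs : s = q * 2 ^ (a + b) + r := by rw [← hdm, hc, Nat.mul_comm]
    have hrbig : (2 ^ a - 1) * 2 ^ b < r := by omega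
    have hpcs : pc s = pc q + pc r := by
      rw [hs]; exact pc_split (a + b) q r hr
    have hpra : pc r = a := by omega
    have := pc_le r a b hr hpra
    omega
  · have hs : s = (q + 1) * 2 ^ (a + b) + r := by rw [← hdm, hc, Nat.mul_comm]
    have hrsmall : r < 2 ^ (a - 1) - 1 := by omega
    have hpcs : pc s = pc (q + 1) + pc r := by
      rw [hs]; exact pc_split (a + b) (q + 1) r hr
    rw [pc_succ_even q hq] at hpcs
    have hpra : pc r = a - 1 := by omega
    have := pc_ge r (a - 1) hpra
    omega

theorem fuel_eq : (2 : Nat) ^ 40 = 1099511627776 := by norm_num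

theorem solution_spec : Claim_equal_solution := by
  intro n hdom hpre
  unfold Spec_solution
  have hb : -2147483648 ≤ n ∧ n ≤ 2147483648 := by
    simpa [Dom_solution, pvDomInt] using hdom
  have h1 : 0 < n := hpre
  have h2 : n ≤ 2147483648 := hb.2
  have hx : n.toNat ≠ 0 := by omega
  have halt : solution_alt n =
      (((n.toNat / 2 ^ (cto (n.toNat / 2 ^ ctz n.toNat) + ctz n.toNat) + 1) *
          2 ^ (cto (n.toNat / 2 ^ ctz n.toNat) + ctz n.toNat) +
        (2 ^ (cto (n.toNat / 2 ^ ctz n.toNat) - 1) - 1) : Nat) : Int) := by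
    simp only [solution_alt, Nat.shiftRight_eq_div_pow, Nat.shiftLeft_eq, one_mul]
  set x := n.toNat with hxd
  set b := ctz x with hbd
  set y := x / 2 ^ b with hyd
  set a := cto y with had
  set q := x / 2 ^ (a + b) with hqd
  obtain ⟨hodd, hxeq⟩ := ctz_spec x hx
  rw [← hbd] at hodd hxeq
  rw [← hyd] at hodd hxeq
  obtain ⟨heven, hyeq⟩ := cto_spec y
  rw [← had] at heven hyeq
  have ha : 1 ≤ a := cto_pos y hodd
  have hqy : y / 2 ^ a = q := by
    rw [hqd, hyd, Nat.div_div_eq_div_mul, ← pow_add, add_comm b a]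
  rw [hqy] at heven hyeq
  have hxval : x = (q * 2 ^ a + (2 ^ a - 1)) * 2 ^ b := by
    conv_lhs => rw [hxeq]
    rw [hyeq]
  obtain ⟨pcT, hxT, hT5, hmin⟩ :=
    core_search q a b ha heven x ((q + 1) * 2 ^ (a + b) + (2 ^ (a - 1) - 1)) hxval rfl
  rw [halt]
  apply solLoop_eq
  · omega
  · rw [fuel_eq]; omega
  · rw [oneCount_eq, oneCount_eq]
    have e1 : (((((q + 1) * 2 ^ (a + b) + (2 ^ (a - 1) - 1) : Nat)) : Int)).natAbs
        = (q + 1) * 2 ^ (a + b) + (2 ^ (a - 1) - 1) := Int.natAbs_natCast _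
    have e2 : n.natAbs = x := by omega
    rw [e1, e2, pcT]
  · intro k hk1 hk2
    rw [oneCount_eq, oneCount_eq]
    have e2 : n.natAbs = x := by omega
    have hk3 : x < k.natAbs := by omega
    have hk4 : k.natAbs < (q + 1) * 2 ^ (a + b) + (2 ^ (a - 1) - 1) := by omega
    rw [e2]
    exact hmin k.natAbs hk3 hk4
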